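-- pv_equiv track=rewrite | github.com/NavinKumarMNK/My-Works | algorithms/codeforces/1987_B_K_sort.py | func
-- ===== SOURCE A (Python) =====
-- from typing import List
--
-- def func(n: int, a: List):
--     pref_max = s = mx = 0
--     for i in range(n):
--         pref_max = max(pref_max, a[i])
--         d = pref_max - a[i]
--         s += d
--         mx = max(mx, d)
--     return s + mx
-- ===== SOURCE B (Python) =====
-- from typing import List
--
-- def func(n: int, a: List):
--     xs = a[:n]
--     m = len(xs)
--     total = best = 0
--     v = 0
--     i = 0
--     while i < m:
--         v = max(v, xs[i])
--         k, ssum, smin = 1, xs[i], xs[i]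
--         i += 1
--         while i < m and xs[i] <= v:
--             k += 1
--             ssum += xs[i]
--             smin = min(smin, xs[i])
--             i += 1
--         total += v * k - ssum
--         best = max(best, v - smin)
--     return total + best
-- ===== Notes on version B (the rewrite author's own statement) =====
-- stated objective: alternative
-- what changed: A's single elementwise pass carrying (pref_max, s, mx) is replaced by a record/segment algorithm: a nested loop walks maximal segments whose elements stay under the current prefix-max record v and adds each segment's contribution in closed form (v*k - segment sum, and v - segment min for the max deficit).
-- outside the precondition, e.g. on func(-1, [-3, 1]): A returns 0, B returns 6
import Mathlib
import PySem

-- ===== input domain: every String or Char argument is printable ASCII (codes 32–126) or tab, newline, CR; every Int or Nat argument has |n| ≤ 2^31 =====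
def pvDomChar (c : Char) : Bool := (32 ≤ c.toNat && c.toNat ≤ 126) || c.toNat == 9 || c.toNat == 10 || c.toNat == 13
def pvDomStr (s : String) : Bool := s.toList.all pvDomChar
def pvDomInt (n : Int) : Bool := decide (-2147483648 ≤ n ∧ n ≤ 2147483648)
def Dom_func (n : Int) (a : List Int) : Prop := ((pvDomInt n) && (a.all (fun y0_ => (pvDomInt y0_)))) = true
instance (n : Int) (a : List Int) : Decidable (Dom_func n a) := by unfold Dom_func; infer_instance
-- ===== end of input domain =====

-- B replaces A's single elementwise pass with a record/segment algorithm: a nested loop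
-- over maximal segments under the current prefix-max record, each contributing in closed form.

-- ===== PORT A =====
def func (n : Int) (a : List Int) : Int :=
  let st := (PySem.List.pyRange 0 n 1).foldl
    (fun (st : Int × Int × Int) i =>
      let ai := PySem.List.pyGetD a i 0   -- a[i]; in range for every i under Pre_func
      let pref := max st.1 ai
      let d := pref - ai
      (pref, st.2.1 + d, max st.2.2 d))
    (0, 0, 0)
  st.2.1 + st.2.2

-- ===== PORT B =====
-- inner while-loop of Source B: consume elements ≤ v, accumulating count, sum and min;
-- returns (k, ssum, smin, remainder)
def segB (v k ssum smin : Int) : List Int → Int × Int × Int × List Int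
  | [] => (k, ssum, smin, [])
  | x :: t =>
    if x ≤ v then segB v (k + 1) (ssum + x) (min smin x) t
    else (k, ssum, smin, x :: t)

-- needed by outerB's termination proof
lemma segB_length_le (v k ssum smin : Int) (l : List Int) :
    (segB v k ssum smin l).2.2.2.length ≤ l.length := by
  induction l generalizing k ssum smin with
  | nil => simp [segB]
  | cons x t ih =>
    simp only [segB]
    split
    · exact le_trans (ih _ _ _) (by simp)
    · simp

-- outer while-loop of Source B (index scan ported as list consumption)
def outerB (v total best : Int) : List Int → Int
  | [] => total + best
  | x :: t =>
    let v' := max v x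
    let r := segB v' 1 x x t
    outerB v' (total + v' * r.1 - r.2.1) (max best (v' - r.2.2.1)) r.2.2.2
termination_by l => l.length
decreasing_by
  simpa using Nat.lt_succ_of_le (segB_length_le _ _ _ _ _)

def func_alt (n : Int) (a : List Int) : Int :=
  outerB 0 0 0 (PySem.List.slice a none (some n))

-- ===== PRECONDITION & SPEC =====
-- Pre_ restricts to the natural domain 0 ≤ n ≤ len(a): for n > len(a) A raises IndexError,
-- and for n < 0 A's empty range silently returns 0 while B's Python negative slice reads a
-- truncated prefix — a corner outside the problem's domain (n is the list's length).
def Pre_func (n : Int) (a : List Int) : Prop := 0 ≤ n ∧ n ≤ (a.length : Int)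
instance (n : Int) (a : List Int) : Decidable (Pre_func n a) := by unfold Pre_func; infer_instance
def pvWitness_func : Int × List Int := (3, [2, -1, 5])

def Spec_func (n : Int) (a : List Int) (out : Int) : Prop := out = func_alt n a
instance (n : Int) (a : List Int) (out : Int) : Decidable (Spec_func n a out) := by unfold Spec_func; infer_instance

-- ===== CLAIM (what is proved, stated in full; the proofs are below) =====
def Claim_equal_func : Prop := ∀ (n : Int) (a : List Int), Dom_func n a → Pre_func n a → Spec_func n a (func n a)

-- ===== LEMMAS AND PROOFS =====

-- the deficit list with running prefix-max seeded at p (proof-only characterisation)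
def pvDefs (p : Int) : List Int → List Int
  | [] => []
  | x :: t => (max p x - x) :: pvDefs (max p x) t

-- A's fused loop, characterised
lemma loopA_eq (xs : List Int) (p s m : Int) :
    (xs.foldl (fun (st : Int × Int × Int) ai =>
        let pref := max st.1 ai
        let d := pref - ai
        (pref, st.2.1 + d, max st.2.2 d)) (p, s, m)).2
      = (s + (pvDefs p xs).sum, (pvDefs p xs).foldl max m) := by
  induction xs generalizing p s m with
  | nil => simp [pvDefs]
  | cons x t ih =>
    simp only [List.foldl_cons, pvDefs, List.sum_cons, List.foldl_cons]
    rw [ih]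
    ring_nf

-- segB, characterised via takeWhile/dropWhile
lemma segB_eq (v : Int) (l : List Int) : ∀ (k s m : Int),
    segB v k s m l =
      (k + ((l.takeWhile (fun x => decide (x ≤ v))).length : Int),
       s + (l.takeWhile (fun x => decide (x ≤ v))).sum,
       (l.takeWhile (fun x => decide (x ≤ v))).foldl min m,
       l.dropWhile (fun x => decide (x ≤ v))) := by
  induction l with
  | nil => intro k s m; simp [segB]
  | cons x t ih =>
    intro k s m
    by_cases h : x ≤ v
    · simp only [segB, List.takeWhile_cons, List.dropWhile_cons, h, decide_true, ite_true]
      rw [ih]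
      simp only [Prod.mk.injEq, List.length_cons, List.sum_cons, List.foldl_cons]
      and_intros <;> first | (push_cast; ring) | rfl | trivial
    · simp [segB, h]

-- pvDefs over a prefix whose elements are all ≤ v
lemma pvDefs_append_le (v : Int) (P R : List Int) (h : ∀ p ∈ P, p ≤ v) :
    pvDefs v (P ++ R) = P.map (fun p => v - p) ++ pvDefs v R := by
  induction P with
  | nil => simp
  | cons p P' ih =>
    have hp : p ≤ v := h p (by simp)
    simp only [List.cons_append, pvDefs, max_eq_left hp, List.map_cons, List.cons_append]
    exact congrArg _ (ih (fun q hq => h q (by simp [hq])))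

lemma sum_map_sub (v : Int) (P : List Int) :
    (P.map (fun p => v - p)).sum = v * P.length - P.sum := by
  induction P with
  | nil => simp
  | cons p P' ih => simp [ih]; ring

lemma max_map_sub (v : Int) (P : List Int) : ∀ (b c : Int),
    (P.map (fun p => v - p)).foldl max (max b (v - c)) = max b (v - P.foldl min c) := by
  induction P with
  | nil => intro b c; simp
  | cons p P' ih =>
    intro b c
    simp only [List.map_cons, List.foldl_cons]
    have h1 : max (max b (v - c)) (v - p) = max b (v - min c p) := by omega
    rw [h1, ih]

-- B's outer loop, characterised against pvDefs
lemma outer_char : ∀ (N : Nat) (xs : List Int), xs.length ≤ N → ∀ (v total best : Int),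
    outerB v total best xs = total + (pvDefs v xs).sum + (pvDefs v xs).foldl max best := by
  intro N
  induction N with
  | zero =>
    intro xs hxs v total best
    have : xs = [] := List.length_eq_zero_iff.mp (Nat.le_zero.mp hxs)
    subst this
    simp [outerB, pvDefs]
  | succ N ih =>
    intro xs hxs v total best
    cases xs with
    | nil => simp [outerB, pvDefs]
    | cons x t =>
      set v' := max v x with hv'
      have hxv : x ≤ v' := le_max_right _ _
      set T := t.takeWhile (fun y => decide (y ≤ v')) with hT
      set D := t.dropWhile (fun y => decide (y ≤ v')) with hD
      have hTD : T ++ D = t := List.takeWhile_append_dropWhile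
      have hTle : ∀ p ∈ T, p ≤ v' := by
        intro p hp
        have := List.mem_takeWhile_imp (hT ▸ hp)
        simpa using this
      have hDlen : D.length ≤ N := by
        have : D.length ≤ t.length := List.length_dropWhile_le _ _
        simp at hxs; omega
      rw [outerB, segB_eq]
      rw [ih D hDlen]
      -- characterise the deficit list of x :: t
      have hdefs : pvDefs v (x :: t) = ((x :: T).map (fun p => v' - p)) ++ pvDefs v' D := by
        have : pvDefs v (x :: t) = (v' - x) :: pvDefs v' t := by
          simp [pvDefs, hv']
        rw [this, ← hTD, pvDefs_append_le v' T D hTle]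
        simp
      rw [hdefs]
      rw [List.sum_append, List.foldl_append]
      have hmax : ((x :: T).map (fun p => v' - p)).foldl max best
          = max best (v' - T.foldl min x) := by
        simp only [List.map_cons, List.foldl_cons]
        rw [max_map_sub]
      rw [hmax, sum_map_sub]
      simp only [List.length_cons, List.sum_cons, ← hv', ← hT]
      push_cast
      ring

-- ===== VERDICT (by name: the statement is the Claim_ definition above) =====
theorem func_spec : Claim_equal_func := by
  intro n a _ hpre
  obtain ⟨hn0, hnlen⟩ := hpre
  unfold Spec_func func func_alt
  set xs := PySem.List.slice a none (some n) with hxs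
  have hxs_take : xs = a.take n.toNat := PySem.List.slice_to a hn0
  have hlen : (xs.length : Int) = n := by
    rw [hxs_take]; simp; omega
  -- A side: range-indexed fold = fold over xs
  have hA : (PySem.List.pyRange 0 n 1).foldl
      (fun (st : Int × Int × Int) i =>
        let ai := PySem.List.pyGetD a i 0
        let pref := max st.1 ai
        let d := pref - ai
        (pref, st.2.1 + d, max st.2.2 d)) (0, 0, 0)
      = xs.foldl (fun (st : Int × Int × Int) ai =>
        let pref := max st.1 ai
        let d := pref - ai
        (pref, st.2.1 + d, max st.2.2 d)) (0, 0, 0) := by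
    have hr : PySem.List.pyRange 0 n 1 = PySem.List.pyRange 0 (PySem.List.len xs) 1 := by
      simp [PySem.List.len_eq, hlen]
    rw [hr]
    rw [← PySem.List.foldl_pyRange_zero_pyGetD xs 0
      (fun (st : Int × Int × Int) ai =>
        let pref := max st.1 ai
        let d := pref - ai
        (pref, st.2.1 + d, max st.2.2 d)) (0, 0, 0)]
    apply PySem.List.foldl_congr_mem
    intro acc i hi
    have hmem := (PySem.List.mem_pyRange_one.mp hi)
    have h0i : 0 ≤ i := by simpa [PySem.List.len_eq] using hmem.1
    have hilt : i < (xs.length : Int) := by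
      have := hmem.2; simpa [PySem.List.len_eq] using this
    have hilt' : i < (a.length : Int) := by omega
    have h1 : PySem.List.pyGetD a i 0 = a[i.toNat] := PySem.List.pyGetD_eq_getElem a 0 h0i hilt'
    have hb : i.toNat < xs.length := by omega
    have h2 : PySem.List.pyGetD xs i 0 = xs[i.toNat]'hb :=
      PySem.List.pyGetD_eq_getElem xs 0 h0i hilt
    have h3 : xs[i.toNat]'hb = a[i.toNat]'(by omega) := by
      simp only [hxs_take]
      exact List.getElem_take
    simp [h1, h2, h3]
  have hA2 := loopA_eq xs 0 0 0
  have hB := outer_char xs.length xs (le_refl _) 0 0 0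
  simp only [hA, hA2, hB]
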